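-- pv_equiv track=rewrite | github.com/Max-Selby/AdventOfCode | 2024/day07/p1.py | couldWork
-- ===== SOURCE A (Python) =====
-- def couldWork(out, inputs) :
--     makers = []
--     assert len(inputs) != 1
--     for binn in range(2 ** (len(inputs) - 1)) :
--         binn = bin(binn)[2:]
--         binn = "0" * ((len(inputs) - 1) - len(binn)) + binn
--         makers.append(binn)
--
--     for maker in makers :
--         su = inputs[0]
--         for idx, inpu in enumerate(inputs[1:]) :
--             if maker[idx] == "0" :
--                 su = su * inpu
--             else :
--                 su = su + inpu
--         if su == out :
--             return True
--     return False
-- ===== SOURCE B (Python) =====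
-- def couldWork(out, inputs):
--     reach = {inputs[0]}
--     for x in inputs[1:]:
--         reach = {v + x for v in reach} | {v * x for v in reach}
--     return out in reach
-- ===== Notes on version B (the rewrite author's own statement) =====
-- stated objective: alternative
-- what changed: Replaces the enumeration of all 2^(n-1) operator bit-strings (each re-evaluated left-to-right) by a single left-to-right pass maintaining the deduplicated set of reachable values.
-- crash fix: On single-element input A raises AssertionError while B returns (out == inputs[0]). — e.g. on couldWork(5, [5]): A raises AssertionError, B returns true
import Mathlib
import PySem

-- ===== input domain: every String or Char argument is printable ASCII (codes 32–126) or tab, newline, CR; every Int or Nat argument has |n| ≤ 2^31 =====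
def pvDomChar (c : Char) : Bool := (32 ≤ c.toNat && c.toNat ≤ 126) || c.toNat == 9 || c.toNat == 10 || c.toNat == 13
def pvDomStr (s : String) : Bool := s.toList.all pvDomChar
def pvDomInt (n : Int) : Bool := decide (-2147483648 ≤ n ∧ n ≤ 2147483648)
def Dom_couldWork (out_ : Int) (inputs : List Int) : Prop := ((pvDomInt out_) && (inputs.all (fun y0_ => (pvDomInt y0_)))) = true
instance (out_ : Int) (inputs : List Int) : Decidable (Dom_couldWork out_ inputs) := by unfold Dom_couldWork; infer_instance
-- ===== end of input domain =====

-- B replaces A's enumeration of all 2^(n-1) operator strings by one pass over the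
-- deduplicated set of reachable values (objective: alternative). Return value only.

-- ===== PORT A =====
-- bin(n)[2:] for n ≥ 1 (digits MSB first; empty for 0)
def pyBinAux : Nat → List Char
  | 0 => []
  | n + 1 => pyBinAux ((n + 1) / 2) ++ [if (n + 1) % 2 = 1 then '1' else '0']
decreasing_by omega

-- bin(n)[2:]  (Python: bin(0)[2:] = "0")
def pyBin (n : Nat) : List Char := if n = 0 then ['0'] else pyBinAux n

def couldWork (out_ : Int) (inputs : List Int) : Bool :=
  let m := inputs.length - 1
  -- makers loop: for binn in range(2 ** (len(inputs)-1)): pad bin(binn)[2:] to length m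
  let makers := (List.range (2 ^ m)).map (fun binn =>
      List.replicate (m - (pyBin binn).length) '0' ++ pyBin binn)
  -- second loop with early 'return True' = any
  makers.any (fun maker =>
    let su0 := PySem.List.pyGetD inputs 0 0          -- inputs[0]
    let su := (PySem.List.enumerate (PySem.List.slice inputs (some 1) none) 0).foldl
      (fun su p => if PySem.List.pyGetD maker p.1 ' ' == '0' then su * p.2 else su + p.2) su0
    su == out_)

-- ===== PORT B =====
def couldWork_alt (out_ : Int) (inputs : List Int) : Bool :=
  let reach : PySem.Set Int := PySem.Set.ofList [PySem.List.pyGetD inputs 0 0]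
  let reach := (PySem.List.slice inputs (some 1) none).foldl
      (fun S x => PySem.Set.union (PySem.Set.ofList (S.map (fun v => v + x)))
                                  (PySem.Set.ofList (S.map (fun v => v * x)))) reach
  PySem.Set.contains reach out_

-- ===== PRECONDITION & SPEC =====
-- Pre_ excludes exactly the inputs where A raises: len 1 (AssertionError) and len 0 (TypeError on range(2**-1)).
def Pre_couldWork (out_ : Int) (inputs : List Int) : Prop := 2 ≤ inputs.length
instance (out_ : Int) (inputs : List Int) : Decidable (Pre_couldWork out_ inputs) := by
  unfold Pre_couldWork; infer_instance
def pvWitness_couldWork : Int × List Int := (6, [2, 3])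

-- On single-element input A raises AssertionError while B returns (out == inputs[0]).
def Raises_couldWork (out_ : Int) (inputs : List Int) : Prop := inputs.length = 1
instance (out_ : Int) (inputs : List Int) : Decidable (Raises_couldWork out_ inputs) := by
  unfold Raises_couldWork; infer_instance
def pvRaiseWitness_couldWork : Int × List Int := (5, [5])
def pvRaiseWitnessOut_couldWork : Bool := true

def Spec_couldWork (out_ : Int) (inputs : List Int) (out : Bool) : Prop := out = couldWork_alt out_ inputs
instance (out_ : Int) (inputs : List Int) (out : Bool) : Decidable (Spec_couldWork out_ inputs out) := by unfold Spec_couldWork; infer_instance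

-- ===== CLAIM (what is proved, stated in full; the proofs are below) =====
def Claim_equal_couldWork : Prop := ∀ (out_ : Int) (inputs : List Int), Dom_couldWork out_ inputs → Pre_couldWork out_ inputs → Spec_couldWork out_ inputs (couldWork out_ inputs)
def Claim_raises_couldWork : Prop := (∀ (out_ : Int) (inputs : List Int), Dom_couldWork out_ inputs → Raises_couldWork out_ inputs → ¬ Pre_couldWork out_ inputs) ∧ (Dom_couldWork (pvRaiseWitness_couldWork.1) (pvRaiseWitness_couldWork.2) ∧ Raises_couldWork (pvRaiseWitness_couldWork.1) (pvRaiseWitness_couldWork.2) ∧ couldWork_alt (pvRaiseWitness_couldWork.1) (pvRaiseWitness_couldWork.2) = pvRaiseWitnessOut_couldWork)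

-- ===== LEMMAS AND PROOFS =====

-- all values reachable from su over xs with * / + at each step (with duplicates)
def allVals (su : Int) : List Int → List Int
  | [] => [su]
  | x :: xs => allVals (su * x) xs ++ allVals (su + x) xs

-- the padded binary string of k (< 2^m) written head-recursively
def bitsM : Nat → Nat → List Char
  | 0, _ => []
  | m + 1, k => (if k < 2 ^ m then '0' else '1') :: bitsM m (k % 2 ^ m)

-- evaluation of a maker string along xs
def evalM : List Char → Int → List Int → Int
  | _, su, [] => su
  | cs, su, x :: xs => evalM cs.tail (if cs.headD ' ' = '0' then su * x else su + x) xs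

-- A's padded string
def padF (m k : Nat) : List Char := List.replicate (m - (pyBin k).length) '0' ++ pyBin k

theorem pyBinAux_zero : pyBinAux 0 = [] := by
  rw [pyBinAux.eq_def]

theorem pyBinAux_pos (k : Nat) (hk : 1 ≤ k) :
    pyBinAux k = pyBinAux (k / 2) ++ [if k % 2 = 1 then '1' else '0'] := by
  cases k with
  | zero => omega
  | succ n => rw [pyBinAux.eq_def]

theorem pyBinAux_one : pyBinAux 1 = ['1'] := by
  rw [pyBinAux_pos 1 (by norm_num)]
  norm_num [pyBinAux_zero]

theorem pyBin_zero : pyBin 0 = ['0'] := by simp [pyBin]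
theorem pyBin_one : pyBin 1 = ['1'] := by simp [pyBin, pyBinAux_one]

theorem pyBinAux_len (m : Nat) : ∀ k, k < 2 ^ m → (pyBinAux k).length ≤ m := by
  induction m with
  | zero => intro k hk; interval_cases k; simp [pyBinAux_zero]
  | succ m ih =>
    intro k hk
    rcases Nat.eq_zero_or_pos k with rfl | hpos
    · simp [pyBinAux_zero]
    · rw [pyBinAux_pos k hpos]
      have h2 : 2 ^ (m + 1) = 2 * 2 ^ m := by ring
      have := ih (k / 2) (by omega)
      simp only [List.length_append, List.length_singleton]
      omega

theorem padF_len (m k : Nat) (hm : 1 ≤ m) (hk : k < 2 ^ m) : (padF m k).length = m := by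
  rcases Nat.eq_zero_or_pos k with rfl | hpos
  · simp [padF, pyBin]; omega
  · have := pyBinAux_len m k hk
    have hb : pyBin k = pyBinAux k := by simp [pyBin]; omega
    have hb1 : 1 ≤ (pyBinAux k).length := by
      rw [pyBinAux_pos k hpos]; simp
    simp [padF, hb]; omega

theorem rep_pull (m : Nat) (hm : 1 ≤ m) :
    List.replicate m '0' = List.replicate (m - 1) '0' ++ ['0'] := by
  conv_lhs => rw [show m = (m - 1) + 1 by omega]
  rw [List.replicate_succ']

theorem padStep (m r : Nat) (hm : 1 ≤ m) (hr : r < 2 ^ (m + 1)) :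
    padF (m + 1) r = padF m (r / 2) ++ [if r % 2 = 1 then '1' else '0'] := by
  match r with
  | 0 =>
    simp only [padF, pyBin_zero, Nat.zero_div, Nat.zero_mod, List.length_singleton]
    norm_num
    rw [rep_pull m hm]
    simp [List.append_assoc]
  | 1 =>
    simp only [padF, pyBin_one, List.length_singleton]
    norm_num
    rw [rep_pull m hm]
    simp [pyBin_zero, List.append_assoc]
  | (n + 2) =>
    have hpos : 1 ≤ n + 2 := by omega
    have hd2 : 1 ≤ (n + 2) / 2 := by omega
    have hb : pyBin (n + 2) = pyBinAux ((n + 2) / 2) ++ [if (n + 2) % 2 = 1 then '1' else '0'] := by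
      rw [pyBin, if_neg (by omega), pyBinAux_pos _ hpos]
    have hb2 : pyBin ((n + 2) / 2) = pyBinAux ((n + 2) / 2) := by
      rw [pyBin, if_neg (by omega)]
    simp only [padF, hb, hb2, List.length_append, List.length_singleton]
    rw [show m + 1 - ((pyBinAux ((n + 2) / 2)).length + 1) = m - (pyBinAux ((n + 2) / 2)).length by omega]
    simp [List.append_assoc]

theorem binHigh (m : Nat) : ∀ k, 2 ^ (m + 1) ≤ k → k < 2 ^ (m + 2) →
    pyBinAux k = '1' :: padF (m + 1) (k - 2 ^ (m + 1)) := by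
  induction m with
  | zero =>
    intro k h1 h2
    norm_num at h1 h2
    have e2 : pyBinAux 2 = ['1', '0'] := by
      rw [pyBinAux_pos 2 (by norm_num)]; norm_num [pyBinAux_one]
    have e3 : pyBinAux 3 = ['1', '1'] := by
      rw [pyBinAux_pos 3 (by norm_num)]; norm_num [pyBinAux_one]
    interval_cases k
    · simp [e2, padF, pyBin_zero]
    · simp [e3, padF, pyBin_one]
  | succ m ih =>
    intro k h1 h2
    have q1 : 2 ^ (m + 1 + 1) = 2 ^ (m + 1) * 2 := by ring
    have q2 : 2 ^ (m + 2) = 2 ^ (m + 1) * 2 := by ring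
    have q3 : 2 ^ (m + 1 + 2) = 2 ^ (m + 1) * 4 := by ring
    have q4 : 2 ^ (m + 3) = 2 ^ (m + 1) * 4 := by ring
    have hp : 1 ≤ 2 ^ (m + 1) := Nat.one_le_two_pow
    rw [pyBinAux_pos k (by omega)]
    rw [ih (k / 2) (by omega) (by omega)]
    rw [padStep (m + 1) (k - 2 ^ (m + 1 + 1)) (by omega) (by omega)]
    have hdiv : (k - 2 ^ (m + 1 + 1)) / 2 = k / 2 - 2 ^ (m + 1) := by omega
    have hmod : (k - 2 ^ (m + 1 + 1)) % 2 = k % 2 := by omega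
    rw [hdiv, hmod]
    simp

theorem padEq (m : Nat) : ∀ k, 1 ≤ m → k < 2 ^ m → padF m k = bitsM m k := by
  induction m with
  | zero => omega
  | succ m ih =>
    intro k _ hk
    rcases Nat.eq_zero_or_pos m with rfl | hm
    · norm_num at hk
      interval_cases k
      · simp [padF, pyBin_zero, bitsM]
      · simp [padF, pyBin_one, bitsM]
    · rw [bitsM]
      by_cases hlo : k < 2 ^ m
      · rw [if_pos hlo, Nat.mod_eq_of_lt hlo, ← ih k hm hlo]
        -- padF (m+1) k = '0' :: padF m k when the digit string fits in m slots
        have hL : (pyBin k).length ≤ m := by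
          rcases Nat.eq_zero_or_pos k with rfl | hpos
          · simp [pyBin]; omega
          · have : pyBin k = pyBinAux k := by simp [pyBin]; omega
            rw [this]; exact pyBinAux_len m k hlo
        simp only [padF]
        rw [show m + 1 - (pyBin k).length = (m - (pyBin k).length) + 1 by omega,
            List.replicate_succ]
        simp
      · rw [if_neg hlo]
        obtain ⟨m', rfl⟩ : ∃ m'', m = m'' + 1 := ⟨m - 1, by omega⟩
        have q1 : 2 ^ (m' + 1 + 1) = 2 ^ (m' + 1) * 2 := by ring
        have q2 : 2 ^ (m' + 2) = 2 ^ (m' + 1) * 2 := by ring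
        have hp : 1 ≤ 2 ^ (m' + 1) := Nat.one_le_two_pow
        have hmod : k % 2 ^ (m' + 1) = k - 2 ^ (m' + 1) := by
          rw [Nat.mod_eq_sub_mod (by omega), Nat.mod_eq_of_lt (by omega)]
        have hbh := binHigh m' k (by omega) (by omega)
        have hpb : pyBin k = pyBinAux k := by rw [pyBin, if_neg (by omega)]
        have hlen : (pyBinAux k).length = m' + 1 + 1 := by
          rw [hbh]
          simp [padF_len (m' + 1) (k - 2 ^ (m' + 1)) (by omega) (by omega)]
        rw [hmod]
        simp only [padF, hpb, hlen]
        rw [show m' + 1 + 1 - (m' + 1 + 1) = 0 by omega]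
        simp only [List.replicate_zero, List.nil_append]
        rw [hbh, ih (k - 2 ^ (m' + 1)) (by omega) (by omega)]

-- the port's inner foldl over enumerate equals evalM on the dropped maker
theorem foldl_enum_evalM (maker : List Char) :
    ∀ (xs : List Int) (su : Int) (i : Nat),
    (PySem.List.enumerate xs (i : Int)).foldl
      (fun su p => if PySem.List.pyGetD maker p.1 ' ' == '0' then su * p.2 else su + p.2) su
    = evalM (maker.drop i) su xs := by
  intro xs
  induction xs with
  | nil => intro su i; simp [PySem.List.enumerate_nil, evalM]
  | cons x xs ih =>
    intro su i
    rw [PySem.List.enumerate_cons, List.foldl_cons, evalM]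
    have h1 : ((i : Int) + 1) = ((i + 1 : Nat) : Int) := by push_cast; ring
    rw [h1, ih _ (i + 1)]
    have hget : PySem.List.pyGetD maker (i : Int) ' ' = (maker.drop i).headD ' ' := by
      rw [PySem.List.pyGetD_natCast]
      simp [List.headD_eq_head?_getD, List.head?_drop, List.getD_eq_getElem?_getD]
    have htail : (maker.drop i).tail = maker.drop (i + 1) := by
      rw [List.tail_drop]
    rw [hget, htail]
    simp only [beq_iff_eq]

theorem foldl_enum_evalM_zero (maker : List Char) (xs : List Int) (su : Int) :
    (PySem.List.enumerate xs 0).foldl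
      (fun su p => if PySem.List.pyGetD maker p.1 ' ' == '0' then su * p.2 else su + p.2) su
    = evalM maker su xs := by
  have h := foldl_enum_evalM maker xs su 0
  simpa using h

-- the bit-string existential equals reachable membership
theorem bitsM_allVals (xs : List Int) :
    ∀ (su out : Int),
    (∃ k, k < 2 ^ xs.length ∧ evalM (bitsM xs.length k) su xs = out) ↔ out ∈ allVals su xs := by
  induction xs with
  | nil =>
    intro su out
    simp only [List.length_nil, pow_zero, allVals, List.mem_singleton]
    constructor
    · rintro ⟨k, hk, h⟩
      obtain rfl : k = 0 := by omega
      simp [evalM] at h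
      exact h.symm
    · rintro rfl
      exact ⟨0, by omega, by simp [evalM]⟩
  | cons x xs ih =>
    intro su out
    have hstep : ∀ k, evalM (bitsM (xs.length + 1) k) su (x :: xs)
        = evalM (bitsM xs.length (k % 2 ^ xs.length)) (if k < 2 ^ xs.length then su * x else su + x) xs := by
      intro k
      rw [bitsM, evalM]
      by_cases hk : k < 2 ^ xs.length <;> simp [hk]
    have h2 : 2 ^ (xs.length + 1) = 2 * 2 ^ xs.length := by ring
    simp only [List.length_cons]
    constructor
    · rintro ⟨k, hk, hev⟩
      rw [hstep] at hev
      simp only [allVals, List.mem_append]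
      by_cases hlo : k < 2 ^ xs.length
      · left
        rw [if_pos hlo, Nat.mod_eq_of_lt hlo] at hev
        exact (ih (su * x) out).mp ⟨k, hlo, hev⟩
      · right
        rw [if_neg hlo] at hev
        have hmod : k % 2 ^ xs.length = k - 2 ^ xs.length := by
          rw [Nat.mod_eq_sub_mod (by omega), Nat.mod_eq_of_lt (by omega)]
        rw [hmod] at hev
        exact (ih (su + x) out).mp ⟨k - 2 ^ xs.length, by omega, hev⟩
    · intro hmem
      simp only [allVals, List.mem_append] at hmem
      rcases hmem with hmem | hmem
      · obtain ⟨k, hk, hev⟩ := (ih (su * x) out).mpr hmem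
        refine ⟨k, by omega, ?_⟩
        rw [hstep, if_pos hk, Nat.mod_eq_of_lt hk]; exact hev
      · obtain ⟨k, hk, hev⟩ := (ih (su + x) out).mpr hmem
        refine ⟨2 ^ xs.length + k, by omega, ?_⟩
        rw [hstep, if_neg (by omega), Nat.add_mod_left, Nat.mod_eq_of_lt hk]; exact hev

-- B's fold over sets tracks membership in allVals
theorem fold_set_allVals (xs : List Int) :
    ∀ (S : PySem.Set Int) (v : Int),
    (v ∈ xs.foldl (fun S x => PySem.Set.union (PySem.Set.ofList (S.map (fun v => v + x)))
                                              (PySem.Set.ofList (S.map (fun v => v * x)))) S)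
    ↔ ∃ s ∈ S, v ∈ allVals s xs := by
  induction xs with
  | nil =>
    intro S v
    simp [allVals]
  | cons x xs ih =>
    intro S v
    rw [List.foldl_cons, ih]
    constructor
    · rintro ⟨s, hs, hv⟩
      rw [PySem.Set.mem_union] at hs
      simp only [PySem.Set.mem_ofList, List.mem_map] at hs
      rcases hs with ⟨t, ht, rfl⟩ | ⟨t, ht, rfl⟩
      · exact ⟨t, ht, by simp [allVals, hv]⟩
      · exact ⟨t, ht, by simp [allVals, hv]⟩
    · rintro ⟨t, ht, hv⟩
      simp only [allVals, List.mem_append] at hv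
      rcases hv with hv | hv
      · refine ⟨t * x, ?_, hv⟩
        rw [PySem.Set.mem_union]; right
        rw [PySem.Set.mem_ofList]; exact List.mem_map.mpr ⟨t, ht, rfl⟩
      · refine ⟨t + x, ?_, hv⟩
        rw [PySem.Set.mem_union]; left
        rw [PySem.Set.mem_ofList]; exact List.mem_map.mpr ⟨t, ht, rfl⟩

-- ===== VERDICT (by name: the statement is the Claim_ definition above) =====
theorem couldWork_spec : Claim_equal_couldWork := by
  intro out_ inputs _ hpre
  unfold Spec_couldWork
  have hlen : 2 ≤ inputs.length := hpre
  have hslice : PySem.List.slice inputs (some 1) none = inputs.drop 1 := by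
    have := PySem.List.slice_from_natCast (xs := inputs) (a := 1)
    simpa using this
  set xs := inputs.drop 1 with hxs
  set su := PySem.List.pyGetD inputs 0 0 with hsu
  have hm : xs.length = inputs.length - 1 := by simp [hxs]
  have hm1 : 1 ≤ xs.length := by omega
  -- A-side characterisation
  have hA : couldWork out_ inputs = true ↔ out_ ∈ allVals su xs := by
    unfold couldWork
    rw [List.any_eq_true]
    simp only [List.mem_map, List.mem_range]
    rw [hslice, ← hm]
    constructor
    · rintro ⟨maker, ⟨k, hk, rfl⟩, hev⟩
      rw [show (List.replicate (xs.length - (pyBin k).length) '0' ++ pyBin k) = padF xs.length k from rfl,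
          padEq xs.length k hm1 hk, foldl_enum_evalM_zero, beq_iff_eq] at hev
      exact (bitsM_allVals xs su out_).mp ⟨k, hk, hev⟩
    · intro hmem
      obtain ⟨k, hk, hev⟩ := (bitsM_allVals xs su out_).mpr hmem
      refine ⟨padF xs.length k, ⟨k, hk, rfl⟩, ?_⟩
      rw [padEq xs.length k hm1 hk, foldl_enum_evalM_zero, beq_iff_eq]
      exact hev
  -- B-side characterisation
  have hB : couldWork_alt out_ inputs = true ↔ out_ ∈ allVals su xs := by
    unfold couldWork_alt
    rw [hslice, PySem.Set.contains_iff, fold_set_allVals]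
    constructor
    · rintro ⟨s, hs, hv⟩
      rw [PySem.Set.mem_ofList, List.mem_singleton] at hs
      rw [hs] at hv; exact hv
    · intro hv
      exact ⟨su, by rw [PySem.Set.mem_ofList]; exact List.mem_singleton.mpr rfl, hv⟩
  rw [Bool.eq_iff_iff, hA, hB]

@[simp]
theorem couldWork_raises : Claim_raises_couldWork := by
  unfold Claim_raises_couldWork
  constructor
  · intro out_ inputs _ hr hp
    unfold Raises_couldWork at hr
    unfold Pre_couldWork at hp
    omega
  · exact ⟨by decide, by decide, by decide⟩
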